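-- pv_equiv track=rewrite | github.com/austinjamesshank/Coil | Coil/Core/FileManagement/fileParser.py | _getIndentLevel
-- ===== SOURCE A (Python) =====
-- def _getIndentLevel(line: str):
--     indent = 0
--     for char in line:
--         if char == " ":
--             indent += 1
--         elif char == "\t":
--             indent += 4
--         else:
--             break
--     return indent // 4
-- ===== SOURCE B (Python) =====
-- def _getIndentLevel(line: str):
--     prefix = line[:len(line) - len(line.lstrip(" \t"))]
--     return (prefix.count(" ") + 4 * prefix.count("\t")) // 4
-- ===== Notes on version B (the rewrite author's own statement) =====
-- stated objective: simpler
-- what changed: Replaces the accumulate-and-break loop with a boundary-then-count decomposition: compute the leading whitespace prefix with lstrip restricted to space and tab, then tally it with two count passes and one division.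
import Mathlib
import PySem

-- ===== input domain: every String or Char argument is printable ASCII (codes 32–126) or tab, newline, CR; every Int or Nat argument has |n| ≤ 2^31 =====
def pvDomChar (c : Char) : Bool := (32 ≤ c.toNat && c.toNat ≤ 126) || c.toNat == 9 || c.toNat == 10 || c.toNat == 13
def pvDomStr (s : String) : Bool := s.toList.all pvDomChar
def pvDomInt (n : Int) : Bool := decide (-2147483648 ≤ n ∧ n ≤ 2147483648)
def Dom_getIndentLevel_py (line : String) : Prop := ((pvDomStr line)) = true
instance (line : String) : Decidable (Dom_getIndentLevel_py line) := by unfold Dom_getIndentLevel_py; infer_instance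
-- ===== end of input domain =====

-- B replaces A's accumulate-and-break loop by a boundary-then-count decomposition (lstrip prefix, then two count passes); simpler, same cost.

-- ===== PORT A =====
-- the for-loop with break: structural recursion over the characters, same accumulator
def getIndentLevel_go : List Char → Int → Int
  | [], indent => indent
  | c :: rest, indent =>
    if c = ' ' then getIndentLevel_go rest (indent + 1)
    else if c = '\t' then getIndentLevel_go rest (indent + 4)
    else indent

def getIndentLevel_py (line : String) : Int :=
  PySem.Int.floordiv (getIndentLevel_go line.toList 0) 4

-- ===== PORT B =====
-- line.lstrip(" \t"): drops exactly the leading chars belonging to {' ', '\t'} — ported by hand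
-- as dropWhile over the code points (exact: chars-argument lstrip is leading dropWhile membership)
def pyLstripSpaceTab (cs : List Char) : List Char :=
  cs.dropWhile (fun c => c == ' ' || c == '\t')

def getIndentLevel_py_alt (line : String) : Int :=
  let cs := line.toList
  -- prefix = line[:len(line) - len(line.lstrip(" \t"))]
  let pfx := PySem.List.slice cs none (some ((cs.length : Int) - ((pyLstripSpaceTab cs).length : Int)))
  -- (prefix.count(" ") + 4 * prefix.count("\t")) // 4   (single-char substring count = char count)
  PySem.Int.floordiv ((pfx.count ' ' : Int) + 4 * (pfx.count '\t' : Int)) 4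

-- ===== PRECONDITION & SPEC =====
def Spec_getIndentLevel_py (line : String) (out : Int) : Prop := out = getIndentLevel_py_alt line
instance (line : String) (out : Int) : Decidable (Spec_getIndentLevel_py line out) := by unfold Spec_getIndentLevel_py; infer_instance

-- ===== CLAIM (what is proved, stated in full; the proofs are below) =====
def Claim_equal_getIndentLevel_py : Prop := ∀ (line : String), Dom_getIndentLevel_py line → Spec_getIndentLevel_py line (getIndentLevel_py line)

-- ===== LEMMAS AND PROOFS =====

lemma getIndentLevel_go_eq (cs : List Char) (a : Int) :
    getIndentLevel_go cs a =
      a + ((cs.takeWhile (fun c => c == ' ' || c == '\t')).count ' ' : Int)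
        + 4 * ((cs.takeWhile (fun c => c == ' ' || c == '\t')).count '\t' : Int) := by
  induction cs generalizing a with
  | nil => simp [getIndentLevel_go]
  | cons c rest ih =>
    by_cases hs : c = ' '
    · subst hs
      simp [getIndentLevel_go, List.takeWhile, ih]
      ring
    · by_cases ht : c = '\t'
      · subst ht
        simp [getIndentLevel_go, List.takeWhile, ih]
        ring
      · have hf : (fun c => c == ' ' || c == '\t') c = false := by simp [hs, ht]
        simp [getIndentLevel_go, hf, hs, ht]

lemma prefix_eq_takeWhile (cs : List Char) :
    PySem.List.slice cs none (some ((cs.length : Int) - ((pyLstripSpaceTab cs).length : Int)))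
      = cs.takeWhile (fun c => c == ' ' || c == '\t') := by
  have h1 : (cs.takeWhile (fun c => c == ' ' || c == '\t')).length
      + (cs.dropWhile (fun c => c == ' ' || c == '\t')).length = cs.length := by
    have h := congrArg List.length
      (List.takeWhile_append_dropWhile (p := fun c => c == ' ' || c == '\t') (l := cs))
    rwa [List.length_append] at h
  have hlen : cs.length - (pyLstripSpaceTab cs).length
      = (cs.takeWhile (fun c => c == ' ' || c == '\t')).length := by
    simp only [pyLstripSpaceTab]
    omega
  have hle : (pyLstripSpaceTab cs).length ≤ cs.length := by
    simpa [pyLstripSpaceTab] using List.length_dropWhile_le (p := fun c => c == ' ' || c == '\t') (l := cs)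
  have hcast : ((cs.length : Int) - ((pyLstripSpaceTab cs).length : Int))
      = ((cs.length - (pyLstripSpaceTab cs).length : Nat) : Int) := by omega
  rw [hcast, PySem.List.slice_to_natCast, hlen]
  exact (List.prefix_iff_eq_take.mp (List.takeWhile_prefix _)).symm

-- ===== VERDICT (by name: the statement is the Claim_ definition above) =====
theorem getIndentLevel_py_spec : Claim_equal_getIndentLevel_py := by
  intro line _
  show getIndentLevel_py line = getIndentLevel_py_alt line
  unfold getIndentLevel_py getIndentLevel_py_alt
  simp only [prefix_eq_takeWhile, getIndentLevel_go_eq]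
  congr 1
  ring
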